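-- pv_equiv track=rewrite | github.com/immissile/42qu_github_mirror | misc/once/rm_num_name.py | check
-- ===== SOURCE A (Python) =====
-- import string
--
-- nums = string.digits
--
-- def check(a):
--     if type(a) is not str:
--         return False
--     else:
--         for i in a:
--             if i not in nums:
--                 return False
--         return True
-- ===== SOURCE B (Python) =====
-- import string
--
-- nums = string.digits
--
-- def check(a):
--     if type(a) is not str:
--         return False
--     return len(a) == sum(a.count(d) for d in nums)
-- ===== Notes on version B (the rewrite author's own statement) =====
-- stated objective: alternative
-- what changed: Replaces the per-character membership scan with early exit by a counting argument: B counts the occurrences of each of the ten digit characters (ten str.count passes) and compares their sum to len(a), which equals len(a) exactly when every character is a digit.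
import Mathlib
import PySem

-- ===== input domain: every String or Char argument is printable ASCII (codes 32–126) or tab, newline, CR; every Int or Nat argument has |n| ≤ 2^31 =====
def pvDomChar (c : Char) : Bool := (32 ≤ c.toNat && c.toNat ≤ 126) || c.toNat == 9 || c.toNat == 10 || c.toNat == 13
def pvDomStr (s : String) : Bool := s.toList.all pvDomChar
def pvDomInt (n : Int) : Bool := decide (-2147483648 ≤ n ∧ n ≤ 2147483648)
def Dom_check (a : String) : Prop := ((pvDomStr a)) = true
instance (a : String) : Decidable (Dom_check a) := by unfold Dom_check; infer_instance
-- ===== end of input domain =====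

-- B replaces A's per-character membership scan (early exit on the first non-digit) by a
-- counting argument: sum the occurrence counts of the ten digit characters and compare to
-- len(a) (alternative decomposition, same asymptotic cost).
-- The Python-side `type(a) is not str` guard is vacuous under the String type.

-- ===== PORT A =====
def pvNums : List Char := "0123456789".toList

-- for i in a: if i not in nums: return False; return True
def checkLoop : List Char → Bool
  | [] => true
  | c :: rest => if !(pvNums.contains c) then false else checkLoop rest

def check (a : String) : Bool := checkLoop a.toList

-- ===== PORT B =====
-- return len(a) == sum(a.count(d) for d in nums)
def check_alt (a : String) : Bool :=
  a.toList.length == (pvNums.map (fun d => PySem.List.count a.toList d)).sum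

-- ===== PRECONDITION & SPEC =====
def Spec_check (a : String) (out : Bool) : Prop := out = check_alt a
instance (a : String) (out : Bool) : Decidable (Spec_check a out) := by unfold Spec_check; infer_instance

-- ===== CLAIM (what is proved, stated in full; the proofs are below) =====
def Claim_equal_check : Prop := ∀ (a : String), Dom_check a → Spec_check a (check a)

-- ===== LEMMAS AND PROOFS =====

theorem checkLoop_eq_all (l : List Char) :
    checkLoop l = l.all (fun c => pvNums.contains c) := by
  induction l with
  | nil => rfl
  | cons c rest ih => simp [checkLoop, List.all_cons, ih]

-- splitting a filter over a pointwise-disjoint disjunction of predicates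
theorem length_filter_or_disjoint (l : List Char) (p q : Char → Bool)
    (h : ∀ c, ¬(p c = true ∧ q c = true)) :
    (l.filter (fun c => p c || q c)).length
      = (l.filter p).length + (l.filter q).length := by
  induction l with
  | nil => rfl
  | cons c rest ih =>
      by_cases hp : p c = true
      · have hq : q c = false := by
          cases hqc : q c
          · rfl
          · exact absurd ⟨hp, hqc⟩ (h c)
        simp [hp, hq, ih]
        omega
      · simp at hp
        cases hq : q c <;> simp [hp, hq, ih] <;> omega

-- sum of counts over a nodup list of keys = length of the filter by membership
theorem sum_counts_eq_length_filter (l : List Char) (ds : List Char) (hnd : ds.Nodup) :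
    (ds.map (fun d => PySem.List.count l d)).sum
      = (l.filter (fun c => ds.contains c)).length := by
  induction ds with
  | nil => simp
  | cons d ds ih =>
      rcases List.nodup_cons.mp hnd with ⟨hd, hnd'⟩
      have hdis : ∀ c, ¬((c == d) = true ∧ ds.contains c = true) := by
        intro c ⟨h1, h2⟩
        have : c = d := by simpa using h1
        subst this
        exact hd (by simpa using h2)
      have hsplit := length_filter_or_disjoint l (fun c => c == d) (fun c => ds.contains c) hdis
      have hfe : l.filter (fun c => (d :: ds).contains c)
          = l.filter (fun c => (c == d) || ds.contains c) := by
        apply List.filter_congr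
        intro x _
        by_cases hx : x = d <;> simp [hx]
      rw [List.map_cons, List.sum_cons, ih hnd', hfe, hsplit,
          PySem.List.count, List.count_eq_length_filter]

theorem all_eq_length_beq (l : List Char) (p : Char → Bool) :
    l.all p = (l.length == (l.filter p).length) := by
  cases h : l.all p
  · have hlt : (l.filter p).length < l.length := by
      rw [List.length_filter_lt_length_iff_exists]
      rcases List.all_eq_false.mp h with ⟨c, hc, hnc⟩
      exact ⟨c, hc, by simpa using hnc⟩
    symm
    exact beq_eq_false_iff_ne.mpr (by omega)
  · have : l.filter p = l :=
      List.filter_eq_self.mpr (by simpa [List.all_eq_true] using h)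
    simp [this]

-- ===== VERDICT =====
theorem check_spec : Claim_equal_check := by
  intro a _
  unfold Spec_check check check_alt
  rw [checkLoop_eq_all, sum_counts_eq_length_filter a.toList pvNums (by decide),
      all_eq_length_beq]
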